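-- pv_equiv track=rewrite | github.com/simonfqy/SimonfqyGitHub | lintcode/medium/1645_least_subsequences.py | LeastSubsequences
-- ===== SOURCE A (Python) =====
-- import bisect
--
-- def LeastSubsequences(nums):
--
--     tails = []
--     for num in nums:
--         i = bisect.bisect(tails, num)
--         if i == len(tails):
--             tails.append(num)
--         else:
--             tails[i] = num
--
--     return len(tails)
-- ===== SOURCE B (Python) =====
-- def LeastSubsequences(nums):
--     # O(n^2) DP: dp[i] = length of the longest non-decreasing subsequence ending at i.
--     dp = []
--     for x in nums:
--         best = 0
--         for xj, dj in zip(nums, dp):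
--             if xj <= x and dj > best:
--                 best = dj
--         dp.append(best + 1)
--     return max(dp) if dp else 0
-- ===== Notes on version B (the rewrite author's own statement) =====
-- stated objective: alternative
-- what changed: Replaced the greedy patience-sorting 'tails' array maintained with bisect by an O(n^2) dynamic program computing, for each position, the length of the longest non-decreasing subsequence ending there, returning its maximum (0 for the empty list).
import Mathlib
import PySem

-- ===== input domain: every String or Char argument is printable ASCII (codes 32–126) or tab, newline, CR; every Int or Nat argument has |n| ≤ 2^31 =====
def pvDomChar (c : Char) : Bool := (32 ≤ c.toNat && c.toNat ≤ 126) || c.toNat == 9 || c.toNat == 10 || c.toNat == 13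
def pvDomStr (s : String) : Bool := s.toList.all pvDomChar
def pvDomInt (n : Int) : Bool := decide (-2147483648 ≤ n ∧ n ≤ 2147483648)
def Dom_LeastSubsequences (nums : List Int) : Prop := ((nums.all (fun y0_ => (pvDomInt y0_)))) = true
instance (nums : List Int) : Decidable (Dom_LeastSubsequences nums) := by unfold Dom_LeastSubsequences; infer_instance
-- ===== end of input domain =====

-- B replaces A's greedy patience-sorting `tails` array (bisect per element) by a
-- quadratic dynamic program over all prefix pairs; same value everywhere (alternative, not faster).

-- ===== PORT A =====
-- bisect.bisect(tails, num): right insertion point in the sorted list `tails`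
-- (the algorithm keeps `tails` sorted); exact there as the count of elements ≤ num.
def pvBisect (t : List Int) (x : Int) : Nat := t.countP (fun v => decide (v ≤ x))

def pvStepA (t : List Int) (x : Int) : List Int :=
  let i := pvBisect t x
  if i = t.length then t ++ [x] else t.set i x

def LeastSubsequences (nums : List Int) : Int :=
  ((nums.foldl pvStepA []).length : Int)

-- ===== PORT B =====
-- inner loop: best = max dp[j] over earlier pairs (xj, dj) = zip(nums, dp) with xj ≤ x
def pvBest (q : List (Int × Int)) (x : Int) : Int :=
  q.foldl (fun b vd => if vd.1 ≤ x ∧ b < vd.2 then vd.2 else b) 0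

def pvStepB (nums : List Int) (dp : List Int) (x : Int) : List Int :=
  dp ++ [pvBest (nums.zip dp) x + 1]

def LeastSubsequences_alt (nums : List Int) : Int :=
  let dp := nums.foldl (pvStepB nums) []
  match dp with
  | [] => 0
  | h :: tl => tl.foldl (fun m d => if m < d then d else m) h  -- max(dp)

-- ===== PRECONDITION & SPEC =====
def Spec_LeastSubsequences (nums : List Int) (out : Int) : Prop := out = LeastSubsequences_alt nums
instance (nums : List Int) (out : Int) : Decidable (Spec_LeastSubsequences nums out) := by unfold Spec_LeastSubsequences; infer_instance

-- ===== CLAIM (what is proved, stated in full; the proofs are below) =====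
def Claim_equal_LeastSubsequences : Prop := ∀ (nums : List Int), Dom_LeastSubsequences nums → Spec_LeastSubsequences nums (LeastSubsequences nums)

-- ===== LEMMAS AND PROOFS =====

/-- Invariant tying A's `tails` to B's `dp` after the prefix `p` has been processed:
`dp` is aligned with `p`, every dp value lies in [1, tails.length], and `tails[k]`
is the minimum element of `p` carrying a dp value ≥ k+1 (that set being nonempty). -/
def InvAB (p t dp : List Int) : Prop :=
  dp.length = p.length ∧
  (∀ vd ∈ p.zip dp, 1 ≤ vd.2 ∧ vd.2 ≤ (t.length : Int)) ∧
  (∀ k, (hk : k < t.length) →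
     (∃ vd ∈ p.zip dp, (k : Int) + 1 ≤ vd.2 ∧ vd.1 = t[k]) ∧
     (∀ vd ∈ p.zip dp, (k : Int) + 1 ≤ vd.2 → t[k] ≤ vd.1))

lemma best_fold_spec (x : Int) (q : List (Int × Int)) : ∀ b : Int,
    b ≤ q.foldl (fun b vd => if vd.1 ≤ x ∧ b < vd.2 then vd.2 else b) b ∧
    (q.foldl (fun b vd => if vd.1 ≤ x ∧ b < vd.2 then vd.2 else b) b = b ∨
      ∃ vd ∈ q, vd.1 ≤ x ∧ vd.2 = q.foldl (fun b vd => if vd.1 ≤ x ∧ b < vd.2 then vd.2 else b) b) ∧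
    (∀ vd ∈ q, vd.1 ≤ x → vd.2 ≤ q.foldl (fun b vd => if vd.1 ≤ x ∧ b < vd.2 then vd.2 else b) b) := by
  induction q with
  | nil => intro b; simp
  | cons hd tl ih =>
    intro b
    simp only [List.foldl_cons]
    by_cases hc : hd.1 ≤ x ∧ b < hd.2
    · rw [if_pos hc]
      obtain ⟨h1, h2, h3⟩ := ih hd.2
      refine ⟨le_of_lt (lt_of_lt_of_le hc.2 h1), ?_, ?_⟩
      · rcases h2 with h | ⟨vd, hm, hle, heq⟩
        · exact Or.inr ⟨hd, by simp, hc.1, h.symm⟩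
        · exact Or.inr ⟨vd, by simp [hm], hle, heq⟩
      · intro vd hm hle
        rcases List.mem_cons.mp hm with rfl | hm
        · exact h1
        · exact h3 vd hm hle
    · rw [if_neg hc]
      obtain ⟨h1, h2, h3⟩ := ih b
      refine ⟨h1, ?_, ?_⟩
      · rcases h2 with h | ⟨vd, hm, hle, heq⟩
        · exact Or.inl h
        · exact Or.inr ⟨vd, by simp [hm], hle, heq⟩
      · intro vd hm hle
        rcases List.mem_cons.mp hm with rfl | hm
        · rcases not_and_or.mp hc with h | h
          · exact absurd hle h
          · exact le_trans (le_of_not_gt h) h1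
        · exact h3 vd hm hle

lemma max_fold_spec (tl : List Int) : ∀ h : Int,
    h ≤ tl.foldl (fun m d => if m < d then d else m) h ∧
    (tl.foldl (fun m d => if m < d then d else m) h = h ∨
      tl.foldl (fun m d => if m < d then d else m) h ∈ tl) ∧
    (∀ d ∈ tl, d ≤ tl.foldl (fun m d => if m < d then d else m) h) := by
  induction tl with
  | nil => intro h; simp
  | cons a tl' ih =>
    intro h
    simp only [List.foldl_cons]
    by_cases hc : h < a
    · rw [if_pos hc]
      obtain ⟨h1, h2, h3⟩ := ih a
      refine ⟨le_of_lt (lt_of_lt_of_le hc h1), ?_, ?_⟩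
      · rcases h2 with h' | h' <;> simp [h']
      · intro d hm
        rcases List.mem_cons.mp hm with rfl | hm
        · exact h1
        · exact h3 d hm
    · rw [if_neg hc]
      obtain ⟨h1, h2, h3⟩ := ih h
      refine ⟨h1, ?_, ?_⟩
      · rcases h2 with h' | h' <;> simp [h']
      · intro d hm
        rcases List.mem_cons.mp hm with rfl | hm
        · exact le_trans (le_of_not_gt hc) h1
        · exact h3 d hm

lemma countP_of_iff (x : Int) : ∀ (t : List Int) (M : Nat), M ≤ t.length →
    (∀ k, (hk : k < t.length) → (t[k] ≤ x ↔ k < M)) →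
    t.countP (fun v => decide (v ≤ x)) = M := by
  intro t
  induction t with
  | nil => intro M hM _; simp at hM; simp [hM]
  | cons a t' ih =>
    intro M hM h
    have h0 := h 0 (by simp)
    simp only [List.getElem_cons_zero] at h0
    simp only [List.length_cons] at hM
    match M with
    | 0 =>
      have ha : ¬ a ≤ x := fun hax => absurd (h0.mp hax) (by omega)
      rw [List.countP_cons_of_neg (by simpa using ha)]
      exact ih 0 (by omega) (fun k hk => by
        have := h (k + 1) (by simpa using Nat.succ_lt_succ hk)
        simpa using this)
    | M' + 1 =>
      have ha : a ≤ x := h0.mpr (by omega)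
      rw [List.countP_cons_of_pos (by simpa using ha)]
      rw [ih M' (by omega) (fun k hk => by
        have := h (k + 1) (by simpa using Nat.succ_lt_succ hk)
        simp only [List.getElem_cons_succ] at this
        rw [this]; omega)]

lemma zip_append_trunc : ∀ (p r d : List Int), d.length = p.length →
    (p ++ r).zip d = p.zip d := by
  intro p
  induction p with
  | nil => intro r d h; simp at h; simp [h]
  | cons a p' ih =>
    intro r d h
    match d with
    | [] => simp
    | b :: d' =>
      simp only [List.cons_append, List.zip_cons_cons, List.cons.injEq, true_and]
      exact ih r d' (by simpa using h)

lemma inv_step (p t dp : List Int) (x : Int) (hInv : InvAB p t dp) :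
    InvAB (p ++ [x]) (pvStepA t x) (dp ++ [pvBest (p.zip dp) x + 1]) := by
  obtain ⟨hlen, hbnd, hmin⟩ := hInv
  set M := pvBest (p.zip dp) x with hMdef
  obtain ⟨hM0, hMatt, hMub⟩ := best_fold_spec x (p.zip dp) 0
  rw [← pvBest, ← hMdef] at hM0 hMatt hMub
  have htnn : (0 : Int) ≤ (t.length : Int) := Int.natCast_nonneg _
  have hMle : M ≤ (t.length : Int) := by
    rcases hMatt with h | ⟨vd, hm, _, heq⟩
    · omega
    · rw [← heq]; exact (hbnd vd hm).2
  have hiff : ∀ k, (hk : k < t.length) → (t[k] ≤ x ↔ (k : Int) < M) := by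
    intro k hk
    constructor
    · intro htk
      obtain ⟨⟨vd, hm, hge, heq⟩, _⟩ := hmin k hk
      have := hMub vd hm (by rw [heq]; exact htk)
      omega
    · intro hkM
      rcases hMatt with h | ⟨vd, hm, hvx, heq⟩
      · omega
      · obtain ⟨_, hub⟩ := hmin k hk
        exact le_trans (hub vd hm (by omega)) hvx
  have hbis : pvBisect t x = M.toNat := by
    apply countP_of_iff x t M.toNat (by omega)
    intro k hk
    rw [hiff k hk]; omega
  have hq : (p ++ [x]).zip (dp ++ [M + 1]) = p.zip dp ++ [(x, M + 1)] := by
    rw [List.zip_append hlen.symm]; simp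
  by_cases happ : pvBisect t x = t.length
  · -- append case: M = t.length
    have hMt : M = (t.length : Int) := by rw [hbis] at happ; omega
    have ht' : pvStepA t x = t ++ [x] := by simp [pvStepA, happ]
    refine ⟨by simp [hlen], ?_, ?_⟩
    · rw [hq, ht']
      intro vd hm
      rcases List.mem_append.mp hm with hm | hm
      · have := hbnd vd hm
        refine ⟨this.1, ?_⟩
        simp only [List.length_append, List.length_cons, List.length_nil]
        push_cast; omega
      · simp only [List.mem_singleton] at hm; subst hm
        refine ⟨by omega, ?_⟩
        simp only [List.length_append, List.length_cons, List.length_nil]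
        push_cast; omega
    · rw [hq, ht']
      intro k hk
      simp only [List.length_append, List.length_cons, List.length_nil] at hk
      by_cases hkt : k < t.length
      · have hget : (t ++ [x])[k]'(by simp; omega) = t[k] := List.getElem_append_left hkt
        obtain ⟨⟨vd, hm, hge, heq⟩, hub⟩ := hmin k hkt
        refine ⟨⟨vd, List.mem_append_left _ hm, hge, by rw [hget, heq]⟩, ?_⟩
        intro vd hm hge
        rcases List.mem_append.mp hm with hm | hm
        · rw [hget]; exact hub vd hm hge
        · simp only [List.mem_singleton] at hm; subst hm
          rw [hget]
          exact (hiff k hkt).mpr (by omega)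
      · have hkeq : k = t.length := by omega
        subst hkeq
        have hget : (t ++ [x])[t.length]'(by simp) = x := by
          rw [List.getElem_append_right (le_refl _)]; simp
        refine ⟨⟨(x, M + 1), List.mem_append_right _ (by simp), by simp; omega, by simp [hget]⟩, ?_⟩
        intro vd hm hge
        rcases List.mem_append.mp hm with hm | hm
        · have := (hbnd vd hm).2; omega
        · simp only [List.mem_singleton] at hm; rw [hget, hm]
  · -- set case: M < t.length, tails[M] := x
    have hcle : pvBisect t x ≤ t.length := List.countP_le_length
    have hMlt : (M : Int) < (t.length : Int) := by rw [hbis] at happ hcle; omega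
    have hMnat : M.toNat < t.length := by omega
    have ht' : pvStepA t x = t.set M.toNat x := by
      simp only [pvStepA, hbis]
      rw [if_neg (by omega)]
    refine ⟨by simp [hlen], ?_, ?_⟩
    · rw [hq, ht']
      intro vd hm
      rcases List.mem_append.mp hm with hm | hm
      · have := hbnd vd hm
        simpa [List.length_set] using this
      · simp only [List.mem_singleton] at hm; subst hm
        simp only [List.length_set]
        exact ⟨by omega, by omega⟩
    · rw [hq, ht']
      intro k hk
      simp only [List.length_set] at hk
      by_cases hkM : k = M.toNat
      · subst hkM
        have hx : (t.set M.toNat x)[M.toNat]'(by simpa [List.length_set] using hk) = x := by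
          rw [List.getElem_set]; simp
        refine ⟨⟨(x, M + 1), List.mem_append_right _ (by simp), by omega, by simp [hx]⟩, ?_⟩
        intro vd hm hge
        rcases List.mem_append.mp hm with hm | hm
        · rw [hx]
          by_cases hvx : vd.1 ≤ x
          · have := hMub vd hm hvx; omega
          · omega
        · simp only [List.mem_singleton] at hm; rw [hx, hm]
      · have hne : (t.set M.toNat x)[k]'(by simpa [List.length_set] using hk) = t[k]'hk := by
          rw [List.getElem_set]; simp [Ne.symm hkM]
        obtain ⟨⟨vd, hm, hge, heq⟩, hub⟩ := hmin k hk
        refine ⟨⟨vd, List.mem_append_left _ hm, hge, by rw [hne, heq]⟩, ?_⟩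
        intro vd hm hge
        rcases List.mem_append.mp hm with hm | hm
        · rw [hne]; exact hub vd hm hge
        · simp only [List.mem_singleton] at hm; subst hm
          rw [hne]
          apply (hiff k hk).mpr
          simp only at hge
          omega

lemma inv_fold (nums : List Int) : ∀ (rest p t dp : List Int), InvAB p t dp → p ++ rest = nums →
    InvAB nums (List.foldl pvStepA t rest) (List.foldl (pvStepB nums) dp rest) := by
  intro rest
  induction rest with
  | nil =>
    intro p t dp hI hp
    simp only [List.append_nil] at hp
    subst hp
    simpa using hI
  | cons x rest' ih =>
    intro p t dp hI hp
    simp only [List.foldl_cons]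
    have hzip : nums.zip dp = p.zip dp := by
      rw [← hp]; exact zip_append_trunc p _ dp hI.1
    have hsb : pvStepB nums dp x = dp ++ [pvBest (p.zip dp) x + 1] := by
      rw [pvStepB, hzip]
    rw [hsb]
    exact ih (p ++ [x]) _ _ (inv_step p t dp x hI) (by rw [← hp]; simp)

lemma final_eq (nums t : List Int)
    (hI : InvAB nums t (List.foldl (pvStepB nums) [] nums)) :
    (t.length : Int) = LeastSubsequences_alt nums := by
  unfold LeastSubsequences_alt
  generalize hdp : List.foldl (pvStepB nums) [] nums = dp at hI ⊢
  obtain ⟨hlen, hbnd, hmin⟩ := hI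
  match dp, hlen, hbnd, hmin with
  | [], hlen, hbnd, hmin =>
    have htnil : t.length = 0 := by
      by_contra hc
      obtain ⟨⟨vd, hvd, _, _⟩, _⟩ := hmin 0 (by omega)
      simp at hvd
    simp [htnil]
  | h :: tl, hlen, hbnd, hmin =>
    show (t.length : Int) = List.foldl (fun m d => if m < d then d else m) h tl
    obtain ⟨h1, h2, h3⟩ := max_fold_spec tl h
    set m := tl.foldl (fun m d => if m < d then d else m) h with hm
    have hmem : m ∈ h :: tl := by
      rcases h2 with h' | h'
      · simp [h']
      · simp [h']
    have hub : ∀ d ∈ h :: tl, d ≤ m := by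
      intro d hd
      rcases List.mem_cons.mp hd with rfl | hd
      · exact h1
      · exact h3 d hd
    have hsnd : (nums.zip (h :: tl)).map Prod.snd = h :: tl :=
      List.map_snd_zip (le_of_eq hlen)
    have hzip_of_mem : ∀ d ∈ h :: tl, ∃ vd ∈ nums.zip (h :: tl), vd.2 = d := by
      intro d hd
      rw [← hsnd] at hd
      obtain ⟨vd, hvd, heq⟩ := List.mem_map.mp hd
      exact ⟨vd, hvd, heq⟩
    obtain ⟨vdm, hvdm, hvdm2⟩ := hzip_of_mem m hmem
    have hmle : m ≤ (t.length : Int) := hvdm2 ▸ (hbnd vdm hvdm).2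
    have hm1 : 1 ≤ m := hvdm2 ▸ (hbnd vdm hvdm).1
    have htpos : 1 ≤ t.length := by
      by_contra hc
      have h0 : t.length = 0 := by omega
      rw [h0] at hmle
      simp at hmle
      omega
    obtain ⟨⟨vd, hvd, hge, _⟩, _⟩ := hmin (t.length - 1) (by omega)
    have hcast : ((t.length - 1 : Nat) : Int) + 1 = (t.length : Int) := by omega
    rw [hcast] at hge
    have hvd2m : vd.2 ≤ m := by
      apply hub
      rw [← hsnd]
      exact List.mem_map.mpr ⟨vd, hvd, rfl⟩
    have : (t.length : Int) ≤ m := le_trans hge hvd2m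
    omega

-- ===== VERDICT (by name: the statement is the Claim_ definition above) =====
theorem LeastSubsequences_spec : Claim_equal_LeastSubsequences := by
  intro nums _
  show LeastSubsequences nums = LeastSubsequences_alt nums
  have hI := inv_fold nums nums [] [] [] ⟨rfl, by simp, by simp⟩ (by simp)
  unfold LeastSubsequences
  exact final_eq nums _ hI
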